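-- pv_equiv track=rewrite | github.com/HyowonKim1116/BOJ-PS | PS#4659.py | same2
-- ===== SOURCE A (Python) =====
-- def same2(word: str):
--     i = ''
--     for w in word:
--         if i != w:
--             i = w
--         elif i not in ['e', 'o']:
--             return 0
--     return 1
-- ===== SOURCE B (Python) =====
-- def same2(word: str):
--     for c in set(word):
--         if c not in ('e', 'o') and c + c in word:
--             return 0
--     return 1
-- ===== Notes on version B (the rewrite author's own statement) =====
-- stated objective: alternative
-- what changed: B abandons the adjacent-pair scan entirely: it builds the set of distinct characters and, for each character outside the e/o allowlist, performs a doubled-substring search c+c in word (correct because an adjacent repeat of c exists iff c+c occurs as a substring).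
import Mathlib
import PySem

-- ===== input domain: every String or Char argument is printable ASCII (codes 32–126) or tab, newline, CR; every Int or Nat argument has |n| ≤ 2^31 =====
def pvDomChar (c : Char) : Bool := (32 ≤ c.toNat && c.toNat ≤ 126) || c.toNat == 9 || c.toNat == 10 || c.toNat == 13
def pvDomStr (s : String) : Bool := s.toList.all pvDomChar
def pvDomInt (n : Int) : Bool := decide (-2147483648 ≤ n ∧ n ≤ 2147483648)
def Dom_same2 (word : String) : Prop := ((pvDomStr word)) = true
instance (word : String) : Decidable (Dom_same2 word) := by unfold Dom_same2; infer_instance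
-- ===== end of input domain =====

-- B replaces A's adjacent-pair scan by a doubled-substring search (c+c in word) over the set of distinct characters; same value, a different algorithm.

-- ===== PORT A =====
-- the accumulator i is '' or a one-character string; modelled as List Char ([] = '')
def same2Loop (i : List Char) : List Char → Int
  | [] => 1
  | w :: rest =>
    if i ≠ [w] then same2Loop [w] rest
    else if ¬ (i = ['e'] ∨ i = ['o']) then 0
    else same2Loop i rest

def same2 (word : String) : Int := same2Loop [] word.toList

-- ===== PORT B =====
-- 'for c in set(word): if c not in ('e','o') and c + c in word: return 0' ; 'return 1'
def same2AltLoop (w : List Char) : List Char → Int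
  | [] => 1
  | c :: rest =>
    if ¬ (c = 'e' ∨ c = 'o') ∧ PySem.Chars.isIn [c, c] w = true then 0
    else same2AltLoop w rest

def same2_alt (word : String) : Int :=
  same2AltLoop word.toList (PySem.Set.ofList word.toList)

-- ===== PRECONDITION & SPEC =====
def Spec_same2 (word : String) (out : Int) : Prop := out = same2_alt word
instance (word : String) (out : Int) : Decidable (Spec_same2 word out) := by unfold Spec_same2; infer_instance

-- ===== CLAIM (what is proved, stated in full; the proofs are below) =====
def Claim_equal_same2 : Prop := ∀ (word : String), Dom_same2 word → Spec_same2 word (same2 word)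

-- ===== LEMMAS AND PROOFS =====

-- 'there is a disallowed adjacent repeat', the common characterisation
def adjBad : List Char → Bool
  | a :: b :: r => if a = b ∧ ¬ (a = 'e' ∨ a = 'o') then true else adjBad (b :: r)
  | _ => false

theorem same2Loop_char (l : List Char) : ∀ c : Char,
    same2Loop [c] l = if adjBad (c :: l) then 0 else 1 := by
  induction l with
  | nil => intro c; simp [same2Loop, adjBad]
  | cons d r ih =>
    intro c
    by_cases h : c = d
    · subst h
      by_cases hb : c = 'e' ∨ c = 'o'
      · have hnb : ¬ (c = c ∧ ¬ (c = 'e' ∨ c = 'o')) := by tauto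
        simp [same2Loop, hb, ih c, adjBad]
      · simp [same2Loop, hb, adjBad]
    · have hne : ([c] : List Char) ≠ [d] := by simp [h]
      simp [same2Loop, hne, ih d, adjBad, h]

theorem same2_char (l : List Char) :
    same2Loop [] l = if adjBad l then 0 else 1 := by
  cases l with
  | nil => simp [same2Loop, adjBad]
  | cons c r =>
    have : same2Loop [] (c :: r) = same2Loop [c] r := by simp [same2Loop]
    rw [this, same2Loop_char]

theorem same2AltLoop_char (w : List Char) (cs : List Char) :
    same2AltLoop w cs =
      if ∃ c ∈ cs, ¬ (c = 'e' ∨ c = 'o') ∧ [c, c] <:+: w then 0 else 1 := by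
  induction cs with
  | nil => simp [same2AltLoop]
  | cons c rest ih =>
    by_cases h : ¬ (c = 'e' ∨ c = 'o') ∧ PySem.Chars.isIn [c, c] w = true
    · have hin : [c, c] <:+: w := (PySem.Chars.isIn_iff_infix _ _).mp h.2
      have hx : ∃ x ∈ c :: rest, ¬ (x = 'e' ∨ x = 'o') ∧ [x, x] <:+: w :=
        ⟨c, List.mem_cons_self, h.1, hin⟩
      simp only [same2AltLoop, if_pos h, if_pos hx]
    · have hnc : ¬ (¬ (c = 'e' ∨ c = 'o') ∧ [c, c] <:+: w) := by
        intro hc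
        exact h ⟨hc.1, (PySem.Chars.isIn_iff_infix _ _).mpr hc.2⟩
      have hiff : (∃ x ∈ c :: rest, ¬ (x = 'e' ∨ x = 'o') ∧ [x, x] <:+: w) ↔
          (∃ x ∈ rest, ¬ (x = 'e' ∨ x = 'o') ∧ [x, x] <:+: w) := by
        constructor
        · rintro ⟨x, hx, hp⟩
          rcases List.mem_cons.mp hx with rfl | hx'
          · exact absurd hp hnc
          · exact ⟨x, hx', hp⟩
        · rintro ⟨x, hx, hp⟩; exact ⟨x, List.mem_cons_of_mem _ hx, hp⟩
      rw [same2AltLoop, if_neg h, ih]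
      simp only [hiff]

theorem infix_adjBad {c : Char} (hb : ¬ (c = 'e' ∨ c = 'o')) :
    ∀ l : List Char, [c, c] <:+: l → adjBad l = true := by
  intro l hinf
  rcases hinf with ⟨pre, suf, hl⟩
  subst hl
  induction pre with
  | nil => simp [adjBad, hb]
  | cons a pre' ih =>
    cases pre' with
    | nil =>
      show adjBad (a :: c :: c :: suf) = true
      simp only [adjBad]
      split
      · rfl
      · simp [hb]
    | cons b pre'' =>
      show adjBad (a :: b :: (pre'' ++ [c, c] ++ suf)) = true
      simp only [adjBad]
      split
      · rfl
      · exact ih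

theorem adjBad_exists : ∀ l : List Char,
    adjBad l = true → ∃ c, ¬ (c = 'e' ∨ c = 'o') ∧ [c, c] <:+: l := by
  intro l
  induction l with
  | nil => intro h; exact absurd h (by simp [adjBad])
  | cons a r ih =>
    intro h
    cases r with
    | nil => exact absurd h (by simp [adjBad])
    | cons b s =>
      by_cases hc : a = b ∧ ¬ (a = 'e' ∨ a = 'o')
      · exact ⟨a, hc.2, [], s, by rw [hc.1]; rfl⟩
      · have ht : adjBad (b :: s) = true := by
          have := h; rwa [adjBad, if_neg hc] at this
        rcases ih ht with ⟨c, hcc, hinf⟩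
        exact ⟨c, hcc, hinf.trans (List.infix_cons (List.infix_refl _))⟩

theorem adjBad_iff (l : List Char) :
    adjBad l = true ↔ ∃ c ∈ PySem.Set.ofList l, ¬ (c = 'e' ∨ c = 'o') ∧ [c, c] <:+: l := by
  constructor
  · intro h
    rcases adjBad_exists l h with ⟨c, hc, hinf⟩
    have hmem : c ∈ l := hinf.subset (by simp)
    exact ⟨c, (PySem.Set.mem_ofList _ _).mpr hmem, hc, hinf⟩
  · rintro ⟨c, _, hc, hinf⟩
    exact infix_adjBad hc l hinf

-- ===== VERDICT (by name: the statement is the Claim_ definition above) =====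
theorem same2_spec : Claim_equal_same2 := by
  intro word _
  unfold Spec_same2 same2 same2_alt
  rw [same2_char, same2AltLoop_char]
  simp only [adjBad_iff]
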